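-- pv_equiv track=rewrite | github.com/faizaan09/compBio | hw1/overlap_graph.py | get_all_overlaps
-- ===== SOURCE A (Python) =====
-- def get_overlap(s1,s2,o_size):
-- 	i,j = 0,0
-- 	max = 0
-- 	for i in range(0,min(len(s1),len(s2))):
-- 		if s1[-i:] == s2[0:i]:
-- 			if i > max:
-- 				max = i
-- 	return max == o_size
--
-- def get_all_overlaps(inp,o_size):
-- 	x,y,min = 0,0,0
-- 	res = []
-- 	for i in range(len(inp)-1):
-- 		for j in range(i+1,len(inp)):
-- 			overlap = get_overlap(inp[i],inp[j],o_size)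
-- 			o2 = get_overlap(inp[j],inp[i],o_size)
-- 			if overlap:
-- 				res.append([i,j])
-- 			if o2:
-- 				res.append([j,i])
--
-- 	return res
-- ===== SOURCE B (Python) =====
-- def _prefix_function(t):
--     # KMP prefix function: pi[i] = length of the longest proper border of t[:i+1]
--     if not t:
--         return []
--     pi = [0]
--     k = 0
--     for c in t[1:]:
--         while k > 0 and c != t[k]:
--             k = pi[k - 1]
--         if c == t[k]:
--             k += 1
--         pi.append(k)
--     return pi
--
-- def _max_overlap(s1, s2):
--     # largest k < min(len(s1), len(s2)) such that s1 ends with s2[:k], else 0,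
--     # read off the failure-link chain of the prefix function of s2 + sep + s1
--     m = min(len(s1), len(s2))
--     if m == 0:
--         return 0
--     t = s2 + "\x00" + s1
--     pi = _prefix_function(t)
--     k = pi[-1]
--     while k >= m:
--         k = pi[k - 1]
--     return k
--
-- def get_all_overlaps(inp, o_size):
--     res = []
--     for i in range(len(inp)):
--         for j in range(i + 1, len(inp)):
--             if _max_overlap(inp[i], inp[j]) == o_size:
--                 res.append([i, j])
--             if _max_overlap(inp[j], inp[i]) == o_size:
--                 res.append([j, i])
--     return res
-- ===== Notes on version B (the rewrite author's own statement) =====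
-- stated objective: alternative
-- what changed: B computes each ordered pair's maximal suffix-prefix overlap via the KMP prefix function of s2 + '\x00' + s1 followed by a failure-link walk, instead of A's scan over all shift lengths comparing a slice pair per length; it trades A's quadratic-in-length slice comparisons for a linear-in-length table, though interpreter constants make it no faster on the measured inputs.
import Mathlib
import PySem

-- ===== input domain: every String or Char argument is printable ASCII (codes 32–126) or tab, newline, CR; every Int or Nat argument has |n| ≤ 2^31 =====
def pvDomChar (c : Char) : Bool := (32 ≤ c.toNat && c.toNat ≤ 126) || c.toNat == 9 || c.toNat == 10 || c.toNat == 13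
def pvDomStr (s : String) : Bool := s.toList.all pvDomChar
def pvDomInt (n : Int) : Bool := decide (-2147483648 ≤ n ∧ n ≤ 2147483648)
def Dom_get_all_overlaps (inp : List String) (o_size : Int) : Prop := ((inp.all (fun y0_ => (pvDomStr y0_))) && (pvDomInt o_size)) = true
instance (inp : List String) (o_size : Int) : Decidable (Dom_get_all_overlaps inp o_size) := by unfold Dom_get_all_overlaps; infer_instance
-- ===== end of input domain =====

-- B computes each pair's maximal suffix-prefix overlap via the KMP prefix function of
-- s2 + '\x00' + s1 with a failure-link walk, instead of A's slice-comparison scan over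
-- all shift lengths; same return value.

-- ===== PORT A =====
def get_overlap (s1 s2 : String) (o_size : Int) : Bool :=
  let l1 := s1.toList
  let l2 := s2.toList
  let mx := (PySem.List.pyRange 0 (min (l1.length : Int) (l2.length : Int)) 1).foldl
    (fun mx i =>
      if PySem.List.slice l1 (some (-i)) none == PySem.List.slice l2 (some 0) (some i) then
        (if i > mx then i else mx)
      else mx) 0
  mx == o_size

def get_all_overlaps (inp : List String) (o_size : Int) : List (List Int) :=
  (PySem.List.pyRange 0 ((inp.length : Int) - 1) 1).foldl (fun res i =>
    (PySem.List.pyRange (i + 1) (inp.length : Int) 1).foldl (fun res j =>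
      let overlap := get_overlap (PySem.List.pyGetD inp i "") (PySem.List.pyGetD inp j "") o_size
      let o2 := get_overlap (PySem.List.pyGetD inp j "") (PySem.List.pyGetD inp i "") o_size
      let res' := if overlap then res ++ [[i, j]] else res
      if o2 then res' ++ [[j, i]] else res') res) []

-- ===== PORT B =====
-- the separator character "\x00" used by Source B
def sepC : Char := Char.ofNat 0

-- the `while k > 0 and c != t[k]: k = pi[k-1]` loop of _prefix_function (fuel-guarded; the
-- fuel `k` suffices because pi[k-1] < k, so the loop does at most k iterations)
def pfFall (t : List Char) (pi : List Nat) (c : Char) : Nat → Nat → Nat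
  | 0, k => k
  | f + 1, k => if 0 < k ∧ ¬ c = t.getD k sepC then pfFall t pi c f (pi.getD (k - 1) 0) else k

-- one iteration of the `for c in t[1:]` loop of _prefix_function
def pfStep (t : List Char) (st : List Nat × Nat) (c : Char) : List Nat × Nat :=
  let k1 := pfFall t st.1 c st.2 st.2
  let k2 := if c = t.getD k1 sepC then k1 + 1 else k1
  (st.1 ++ [k2], k2)

def prefixFun (t : List Char) : List Nat :=
  match t with
  | [] => []
  | _ :: rest => (rest.foldl (pfStep t) ([0], 0)).1

-- the `while k >= m: k = pi[k-1]` loop of _max_overlap (fuel-guarded likewise)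
def chainDown (pi : List Nat) (m : Nat) : Nat → Nat → Nat
  | 0, k => k
  | f + 1, k => if m ≤ k then chainDown pi m f (pi.getD (k - 1) 0) else k

def maxOvAlt (l1 l2 : List Char) : Nat :=
  let m := min l1.length l2.length
  if m = 0 then 0
  else
    let t := l2 ++ sepC :: l1
    let pi := prefixFun t
    let k0 := pi.getD (t.length - 1) 0
    chainDown pi m k0 k0

def get_all_overlaps_alt (inp : List String) (o_size : Int) : List (List Int) :=
  (PySem.List.pyRange 0 (inp.length : Int) 1).foldl (fun res i =>
    (PySem.List.pyRange (i + 1) (inp.length : Int) 1).foldl (fun res j =>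
      let res' := if ((maxOvAlt (PySem.List.pyGetD inp i "").toList (PySem.List.pyGetD inp j "").toList : Int) == o_size) then res ++ [[i, j]] else res
      if ((maxOvAlt (PySem.List.pyGetD inp j "").toList (PySem.List.pyGetD inp i "").toList : Int) == o_size) then res' ++ [[j, i]] else res') res) []

-- ===== PRECONDITION & SPEC =====
def Spec_get_all_overlaps (inp : List String) (o_size : Int) (out : List (List Int)) : Prop := out = get_all_overlaps_alt inp o_size
instance (inp : List String) (o_size : Int) (out : List (List Int)) : Decidable (Spec_get_all_overlaps inp o_size out) := by unfold Spec_get_all_overlaps; infer_instance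

-- ===== CLAIM (what is proved, stated in full; the proofs are below) =====
def Claim_equal_get_all_overlaps : Prop := ∀ (inp : List String) (o_size : Int), Dom_get_all_overlaps inp o_size → Spec_get_all_overlaps inp o_size (get_all_overlaps inp o_size)

-- ===== LEMMAS AND PROOFS =====

-- `maxB t p` = length of the longest proper border of `t.take p` (longest b < p with
-- `t.take b` a suffix of `t.take p`); the value the prefix function must compute.
def maxB (t : List Char) (p : Nat) : Nat :=
  Nat.findGreatest (fun b => t.take b <:+ t.take p) (p - 1)

theorem maxB_le (t : List Char) (p : Nat) : maxB t p ≤ p - 1 :=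
  Nat.findGreatest_le _

theorem maxB_suffix (t : List Char) (p : Nat) : t.take (maxB t p) <:+ t.take p :=
  Nat.findGreatest_spec (P := fun b => t.take b <:+ t.take p) (Nat.zero_le _)
    (show t.take 0 <:+ t.take p by simp)

theorem le_maxB (t : List Char) (p : Nat) {b : Nat} (hb : b ≤ p - 1)
    (hs : t.take b <:+ t.take p) : b ≤ maxB t p :=
  Nat.le_findGreatest hb hs

-- shorter suffix of the same list is a suffix of a longer one
theorem suffix_of_suffix_le {u v w : List Char} (hu : u <:+ w) (hv : v <:+ w)
    (h : u.length ≤ v.length) : u <:+ v := by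
  rw [← List.reverse_prefix] at hu hv ⊢
  exact List.prefix_of_prefix_length_le hu hv (by simpa using h)

theorem concat_suffix_concat (xs ys : List Char) (x y : Char) :
    (xs ++ [x] <:+ ys ++ [y]) ↔ (x = y ∧ xs <:+ ys) := by
  rw [← List.reverse_prefix]
  simp [List.reverse_append, List.cons_prefix_cons, List.reverse_prefix]

theorem take_succ_concat (t : List Char) (b : Nat) (hb : b < t.length) :
    t.take (b + 1) = t.take b ++ [t.getD b sepC] := by
  rw [List.take_add_one, List.getElem?_eq_getElem hb,
      List.getD_eq_getElem?_getD, List.getElem?_eq_getElem hb]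
  rfl

-- border-extension: borders of length b+1 of `t.take (p+1)` correspond to borders b of
-- `t.take p` whose next character matches
theorem border_ext (t : List Char) {b p : Nat} (hb : b < p) (hp : p < t.length) :
    (t.take (b + 1) <:+ t.take (p + 1)) ↔
      (t.take b <:+ t.take p ∧ t.getD b sepC = t.getD p sepC) := by
  rw [take_succ_concat t b (by omega), take_succ_concat t p hp, concat_suffix_concat]
  exact and_comm

-- generic correctness of the fuel-guarded failure-link loop of _prefix_function
theorem pfFall_reaches (t : List Char) (pi : List Nat) (c : Char) (Inv : Nat → Prop)
    (hstep : ∀ k, Inv k → 0 < k → ¬ c = t.getD k sepC →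
      Inv (pi.getD (k - 1) 0) ∧ pi.getD (k - 1) 0 < k) :
    ∀ f k, k ≤ f → Inv k →
      ∃ r, pfFall t pi c f k = r ∧ Inv r ∧ (r = 0 ∨ c = t.getD r sepC) := by
  intro f
  induction f with
  | zero => intro k hk hInv; exact ⟨k, rfl, hInv, Or.inl (Nat.le_zero.mp hk)⟩
  | succ f ih =>
    intro k hk hInv
    rw [pfFall]
    by_cases h : 0 < k ∧ ¬ c = t.getD k sepC
    · obtain ⟨hInv', hlt⟩ := hstep k hInv h.1 h.2
      rw [if_pos h]
      exact ih _ (by omega) hInv'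
    · rw [if_neg h]
      refine ⟨k, rfl, hInv, ?_⟩
      by_cases h0 : k = 0
      · exact Or.inl h0
      · right; by_contra hc; exact h ⟨Nat.pos_of_ne_zero h0, hc⟩

-- generic correctness of the fuel-guarded `while k >= m` loop of _max_overlap
theorem chainDown_reaches (pi : List Nat) (m : Nat) (Inv : Nat → Prop)
    (hstep : ∀ k, Inv k → m ≤ k → Inv (pi.getD (k - 1) 0) ∧ pi.getD (k - 1) 0 < k)
    (hm : 0 < m) :
    ∀ f k, k ≤ f → Inv k → ∃ r, chainDown pi m f k = r ∧ Inv r ∧ r < m := by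
  intro f
  induction f with
  | zero => intro k hk hInv; exact ⟨k, rfl, hInv, by omega⟩
  | succ f ih =>
    intro k hk hInv
    rw [chainDown]
    by_cases h : m ≤ k
    · obtain ⟨hInv', hlt⟩ := hstep k hInv h
      rw [if_pos h]
      exact ih _ (by omega) hInv'
    · rw [if_neg h]
      exact ⟨k, rfl, hInv, by omega⟩

-- the crucial step: one pfStep applied to correct state yields correct state
theorem pfStep_correct (t : List Char) (p : Nat) (hp : 1 ≤ p) (hplen : p < t.length) :
    pfStep t ((List.range p).map (fun j => maxB t (j + 1)), maxB t p) (t.getD p sepC)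
      = ((List.range (p + 1)).map (fun j => maxB t (j + 1)), maxB t (p + 1)) := by
  set c := t.getD p sepC with hc
  set pi := (List.range p).map (fun j => maxB t (j + 1)) with hpi
  have hlook : ∀ j, 1 ≤ j → j ≤ p → pi.getD (j - 1) 0 = maxB t j := by
    intro j h1 h2
    rw [hpi, List.getD_eq_getElem?_getD, List.getElem?_map,
        List.getElem?_range (show j - 1 < p by omega)]
    simp only [Option.map_some, Option.getD_some]
    rw [show j - 1 + 1 = j from by omega]
  set Inv : Nat → Prop := fun k => t.take k <:+ t.take p ∧ k < p ∧
      ∀ b, b < p → t.take b <:+ t.take p → t.getD b sepC = c → b ≤ k with hInvdef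
  have hstep : ∀ k, Inv k → 0 < k → ¬ c = t.getD k sepC →
      Inv (pi.getD (k - 1) 0) ∧ pi.getD (k - 1) 0 < k := by
    intro k hk hkpos hne
    obtain ⟨hsuf, hklt, hmax⟩ := hk
    rw [hlook k hkpos (le_of_lt hklt)]
    have hlt : maxB t k < k := by have := maxB_le t k; omega
    refine ⟨⟨(maxB_suffix t k).trans hsuf, by omega, ?_⟩, hlt⟩
    intro b hbp hbs hbc
    have hble : b ≤ k := hmax b hbp hbs hbc
    have hbne : b ≠ k := by rintro rfl; exact hne hbc.symm
    have hlen : (t.take b).length ≤ (t.take k).length := by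
      simp only [List.length_take]; omega
    exact le_maxB t k (by omega) (suffix_of_suffix_le hbs hsuf hlen)
  have hInv0 : Inv (maxB t p) := by
    refine ⟨maxB_suffix t p, by have := maxB_le t p; omega, ?_⟩
    intro b hbp hbs _
    exact le_maxB t p (by omega) hbs
  obtain ⟨r, hr, ⟨hrsuf, hrlt, hrmax⟩, hstop⟩ :=
    pfFall_reaches t pi c Inv hstep (maxB t p) (maxB t p) le_rfl hInv0
  have hnew : (if c = t.getD r sepC then r + 1 else r) = maxB t (p + 1) := by
    by_cases hcr : c = t.getD r sepC
    · rw [if_pos hcr]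
      apply le_antisymm
      · apply le_maxB t (p + 1) (by omega)
        exact (border_ext t hrlt hplen).mpr ⟨hrsuf, hcr.symm.trans hc⟩
      · by_cases hle' : maxB t (p + 1) ≤ r + 1
        · exact hle'
        · exfalso
          have hgt : r + 1 < maxB t (p + 1) := by omega
          have hmle : maxB t (p + 1) ≤ (p + 1) - 1 := maxB_le t (p + 1)
          have hb : maxB t (p + 1) - 1 < p := by omega
          have hext := (border_ext t hb hplen).mp
            (by rw [show maxB t (p + 1) - 1 + 1 = maxB t (p + 1) from by omega]
                exact maxB_suffix t (p + 1))
          have hle := hrmax (maxB t (p + 1) - 1) (by omega) hext.1 (hext.2.trans hc.symm)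
          omega
    · rw [if_neg hcr]
      have hr0 : r = 0 := by
        rcases hstop with h | h
        · exact h
        · exact absurd h hcr
      have hz : maxB t (p + 1) = 0 := by
        rw [maxB, Nat.findGreatest_eq_zero_iff]
        intro b' hb'0 hb'le hP
        have hbext := (border_ext t (show b' - 1 < p by omega) hplen).mp
          (by rw [show b' - 1 + 1 = b' from by omega]; exact hP)
        have hle := hrmax (b' - 1) (by omega) hbext.1 (hbext.2.trans hc.symm)
        have hb1 : b' - 1 = 0 := by omega
        exact hcr (by rw [hr0, ← hb1]; exact hc.trans hbext.2.symm)
      rw [hz, hr0]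
  simp only [pfStep, hr, hnew]
  rw [List.range_succ, List.map_append, hpi]
  simp

theorem prefixFun_fold (c0 : Char) (rest : List Char) :
    ∀ q, q ≤ rest.length →
      (rest.take q).foldl (pfStep (c0 :: rest)) ([0], 0)
        = ((List.range (q + 1)).map (fun j => maxB (c0 :: rest) (j + 1)),
           maxB (c0 :: rest) (q + 1)) := by
  intro q
  induction q with
  | zero =>
    intro _
    simp [maxB, List.range_one]
  | succ q ih =>
    intro hq
    have hq' : q < rest.length := by omega
    rw [List.take_add_one, List.getElem?_eq_getElem hq']
    simp only [Option.toList_some]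
    rw [List.foldl_append, ih (by omega), List.foldl_cons, List.foldl_nil]
    have hchar : rest[q] = (c0 :: rest).getD (q + 1) sepC := by
      simp [List.getD_eq_getElem?_getD, List.getElem?_eq_getElem hq']
    rw [hchar]
    exact pfStep_correct (c0 :: rest) (q + 1) (by omega) (by simp; omega)

theorem prefixFun_correct (t : List Char) (i : Nat) (hi : i < t.length) :
    (prefixFun t).getD i 0 = maxB t (i + 1) := by
  cases t with
  | nil => simp at hi
  | cons c0 rest =>
    have h := prefixFun_fold c0 rest rest.length le_rfl
    rw [List.take_length] at h
    rw [prefixFun, h]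
    have hi' : i < rest.length + 1 := by simpa using hi
    rw [List.getD_eq_getElem?_getD, List.getElem?_map, List.getElem?_range hi']
    rfl

theorem maxOvAlt_eq (l1 l2 : List Char) :
    maxOvAlt l1 l2
      = Nat.findGreatest (fun k => PySem.Chars.endswith l1 (l2.take k) = true)
          (min l1.length l2.length - 1) := by
  simp only [maxOvAlt]
  by_cases hm : min l1.length l2.length = 0
  · rw [if_pos hm, hm]
    simp
  · rw [if_neg hm]
    set m := min l1.length l2.length with hmdef
    set t := l2 ++ sepC :: l1 with ht
    have hmpos : 0 < m := Nat.pos_of_ne_zero hm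
    have hm1 : m ≤ l1.length := Nat.min_le_left _ _
    have hm2 : m ≤ l2.length := Nat.min_le_right _ _
    have htlen : t.length = l2.length + 1 + l1.length := by
      rw [ht]; simp [List.length_append]; omega
    have hl1suf : l1 <:+ t := by
      rw [ht]
      exact (List.suffix_cons sepC l1).trans (List.suffix_append l2 (sepC :: l1))
    have hbridge : ∀ b, b < m →
        ((t.take b <:+ t) ↔ PySem.Chars.endswith l1 (l2.take b) = true) := by
      intro b hb
      have htb : t.take b = l2.take b := by
        rw [ht, List.take_append_of_le_length (by omega)]
      rw [htb, PySem.Chars.endswith_iff]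
      constructor
      · intro h
        apply suffix_of_suffix_le h hl1suf
        simp only [List.length_take]
        omega
      · intro h
        exact h.trans hl1suf
    have htake : t.take t.length = t := List.take_length
    set pi := prefixFun t with hpidef
    have hk0 : pi.getD (t.length - 1) 0 = maxB t t.length := by
      have h := prefixFun_correct t (t.length - 1) (by omega)
      rwa [show t.length - 1 + 1 = t.length from by omega] at h
    set Inv : Nat → Prop := fun k => t.take k <:+ t ∧ k < t.length ∧
        ∀ b, b < m → t.take b <:+ t → b ≤ k with hInvdef
    have hstep : ∀ k, Inv k → m ≤ k → Inv (pi.getD (k - 1) 0) ∧ pi.getD (k - 1) 0 < k := by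
      intro k hk hmk
      obtain ⟨hsuf, hklt, hmax⟩ := hk
      have hpik : pi.getD (k - 1) 0 = maxB t k := by
        have h := prefixFun_correct t (k - 1) (by omega)
        rwa [show k - 1 + 1 = k from by omega] at h
      rw [hpik]
      have hlt : maxB t k < k := by have := maxB_le t k; omega
      refine ⟨⟨(maxB_suffix t k).trans (htake ▸ hsuf), by omega, ?_⟩, hlt⟩
      · intro b hbm hbs
        have hblt : b < k := by omega
        have hlen : (t.take b).length ≤ (t.take k).length := by
          simp only [List.length_take]; omega
        exact le_maxB t k (by omega)
          (suffix_of_suffix_le hbs hsuf hlen)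
    have hInv0 : Inv (pi.getD (t.length - 1) 0) := by
      rw [hk0]
      refine ⟨?_, by have := maxB_le t t.length; omega, ?_⟩
      · have h := maxB_suffix t t.length; rwa [htake] at h
      · intro b hbm hbs
        exact le_maxB t t.length (by omega) (by rw [htake]; exact hbs)
    obtain ⟨r, hr, ⟨hrs, hrlen, hrmax⟩, hrm⟩ :=
      chainDown_reaches pi m Inv hstep hmpos (pi.getD (t.length - 1) 0)
        (pi.getD (t.length - 1) 0) le_rfl hInv0
    rw [hr]
    apply le_antisymm
    · exact Nat.le_findGreatest (by omega) ((hbridge r hrm).mp hrs)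
    · have hP0 : PySem.Chars.endswith l1 (l2.take 0) = true := by
        rw [PySem.Chars.endswith_iff]; simp
      have hgP := Nat.findGreatest_spec
        (P := fun k => PySem.Chars.endswith l1 (l2.take k) = true)
        (Nat.zero_le (m - 1)) hP0
      have hgle : Nat.findGreatest
          (fun k => PySem.Chars.endswith l1 (l2.take k) = true) (m - 1) ≤ m - 1 :=
        Nat.findGreatest_le _
      exact hrmax _ (by omega) ((hbridge _ (by omega)).mpr hgP)

-- ==== A-side characterisation (A's scan equals the same findGreatest) ====

def matchA (l1 l2 : List Char) (i : Int) : Bool :=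
  PySem.List.slice l1 (some (-i)) none == PySem.List.slice l2 (some 0) (some i)

def auxA (l1 l2 : List Char) (n : Nat) : Int :=
  (PySem.List.pyRange 0 (n : Int) 1).foldl
    (fun mx i => if matchA l1 l2 i then (if i > mx then i else mx) else mx) 0

def descFirst (l1 l2 : List Char) : Nat → Int
  | 0 => 0
  | k + 1 =>
      if PySem.Chars.endswith l1 (l2.take (k + 1)) then ((k + 1 : Nat) : Int)
      else descFirst l1 l2 k

theorem matchA_eq_endswith (l1 l2 : List Char) (i : Nat) (h1 : 0 < i)
    (h2 : i ≤ l2.length) :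
    matchA l1 l2 (i : Int) = PySem.Chars.endswith l1 (l2.take i) := by
  unfold matchA
  rw [PySem.List.slice_from_neg_natCast l1 i h1, PySem.List.slice_zero_start,
      PySem.List.slice_to_natCast]
  have key : (List.drop (l1.length - i) l1 = List.take i l2) ↔ (List.take i l2) <:+ l1 := by
    constructor
    · intro heq; exact heq ▸ List.drop_suffix _ l1
    · rintro ⟨t, ht⟩
      have hlen : (List.take i l2).length = i := by simp [h2]
      subst ht
      have hl : (t ++ List.take i l2).length - i = t.length := by
        simp [List.length_append, hlen]
      rw [hl, List.drop_left]
  rw [Bool.eq_iff_iff]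
  simp only [beq_iff_eq, PySem.Chars.endswith_iff]
  exact key

theorem auxA_eq_descFirst (l1 l2 : List Char) (n : Nat)
    (hn : n ≤ min l1.length l2.length) :
    auxA l1 l2 n = descFirst l1 l2 (n - 1) ∧ 0 ≤ auxA l1 l2 n ∧
      (auxA l1 l2 n < (n : Int) ∨ n = 0) := by
  induction n with
  | zero =>
    have h0 : auxA l1 l2 0 = 0 := by
      simp [auxA, PySem.List.pyRange_one_eq_nil (le_refl (0 : Int))]
    exact ⟨by rw [h0]; rfl, by rw [h0], Or.inr rfl⟩
  | succ n ih =>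
    have ih' := ih (by omega)
    obtain ⟨heq, hge, hlt⟩ := ih'
    have hstep : auxA l1 l2 (n + 1) =
        (if matchA l1 l2 (n : Int) then (if (n : Int) > auxA l1 l2 n then (n : Int) else auxA l1 l2 n)
         else auxA l1 l2 n) := by
      have hc : ((n + 1 : Nat) : Int) = (n : Int) + 1 := by push_cast; rfl
      rw [auxA, hc, PySem.List.pyRange_one_succ_right (by positivity)]
      rw [List.foldl_append, ← auxA]
      rfl
    rcases Nat.eq_zero_or_pos n with hz | hpos
    · subst hz
      have h0 : auxA l1 l2 0 = 0 := by
        simp [auxA, PySem.List.pyRange_one_eq_nil (le_refl (0 : Int))]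
      rw [hstep, h0]
      constructor
      · cases hm : matchA l1 l2 ((0 : Nat) : Int) <;> simp [descFirst]
      · constructor
        · cases hm : matchA l1 l2 ((0 : Nat) : Int) <;> simp
        · left
          cases hm : matchA l1 l2 ((0 : Nat) : Int) <;> simp
    · have hltn : auxA l1 l2 n < (n : Int) := by
        rcases hlt with h | h
        · exact h
        · omega
      have hm : matchA l1 l2 ((n : Nat) : Int) = PySem.Chars.endswith l1 (l2.take n) :=
        matchA_eq_endswith l1 l2 n hpos (by omega)
      have hd : descFirst l1 l2 ((n + 1) - 1) =
          (if PySem.Chars.endswith l1 (l2.take n) then (n : Int) else descFirst l1 l2 (n - 1)) := by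
        have hrw : (n + 1) - 1 = (n - 1) + 1 := by omega
        rw [hrw]
        have htk : (n - 1) + 1 = n := by omega
        rw [descFirst, htk]
      rw [hstep, hm, hd]
      cases he : PySem.Chars.endswith l1 (l2.take n)
      · simp only [Bool.false_eq_true, reduceIte]
        refine ⟨heq, hge, Or.inl (by push_cast; omega)⟩
      · simp only [reduceIte]
        rw [if_pos hltn]
        refine ⟨rfl, Int.natCast_nonneg n, Or.inl (by push_cast; omega)⟩

theorem descFirst_eq_findGreatest (l1 l2 : List Char) (n : Nat) :
    descFirst l1 l2 n
      = ((Nat.findGreatest (fun k => PySem.Chars.endswith l1 (l2.take k) = true) n : Nat) : Int) := by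
  induction n with
  | zero => simp [descFirst]
  | succ n ih =>
    rw [descFirst, Nat.findGreatest_succ]
    by_cases h : PySem.Chars.endswith l1 (l2.take (n + 1)) = true
    · simp [h]
    · simp only [h, if_false, Bool.false_eq_true, ih]

theorem get_overlap_eq (s1 s2 : String) (o : Int) :
    get_overlap s1 s2 o = ((maxOvAlt s1.toList s2.toList : Int) == o) := by
  simp only [get_overlap, maxOvAlt_eq]
  have hmin : min ((s1.toList.length : Int)) ((s2.toList.length : Int)) =
      ((min s1.toList.length s2.toList.length : Nat) : Int) := by
    simp [Nat.cast_min]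
  rw [hmin]
  have := (auxA_eq_descFirst s1.toList s2.toList (min s1.toList.length s2.toList.length)
    (le_refl _)).1
  unfold auxA matchA at this
  rw [this, descFirst_eq_findGreatest]

-- ===== VERDICT (by name: the statement is the Claim_ definition above) =====
theorem get_all_overlaps_spec : Claim_equal_get_all_overlaps := by
  intro inp o _
  unfold Spec_get_all_overlaps get_all_overlaps get_all_overlaps_alt
  simp only [get_overlap_eq]
  set n : Int := (inp.length : Int) with hn
  set F : List (List Int) → Int → List (List Int) := fun res i =>
    (PySem.List.pyRange (i + 1) n 1).foldl (fun res j =>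
      let res' := if ((maxOvAlt (PySem.List.pyGetD inp i "").toList (PySem.List.pyGetD inp j "").toList : Int) == o) then res ++ [[i, j]] else res
      if ((maxOvAlt (PySem.List.pyGetD inp j "").toList (PySem.List.pyGetD inp i "").toList : Int) == o) then res' ++ [[j, i]] else res') res with hF
  show (PySem.List.pyRange 0 (n - 1) 1).foldl F [] = (PySem.List.pyRange 0 n 1).foldl F []
  rcases (by omega : n ≤ 0 ∨ 0 < n) with hle | hpos
  · rw [PySem.List.pyRange_one_eq_nil (by omega), PySem.List.pyRange_one_eq_nil (by omega)]
  · have hsplit : PySem.List.pyRange 0 n 1 =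
        PySem.List.pyRange 0 (n - 1) 1 ++ PySem.List.pyRange (n - 1) n 1 :=
      PySem.List.pyRange_one_append 0 (n - 1) n (by omega) (by omega)
    have hlast : PySem.List.pyRange (n - 1) n 1 = [n - 1] := by
      have h1 : PySem.List.pyRange (n - 1) ((n - 1) + 1) 1 = [n - 1] :=
        PySem.List.pyRange_one_singleton (n - 1)
      have h2 : (n - 1) + 1 = n := by omega
      rwa [h2] at h1
    rw [hsplit, hlast, List.foldl_append, List.foldl_cons, List.foldl_nil]
    have : ∀ acc, F acc (n - 1) = acc := by
      intro acc
      rw [hF]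
      simp only
      rw [show PySem.List.pyRange (n - 1 + 1) n 1 = [] from
        PySem.List.pyRange_one_eq_nil (by omega)]
      rfl
    rw [this]
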